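-- pv_equiv track=rewrite | github.com/drpicox/podcast-del-doctor | scripts/generate_retroactive_chapters.py | split_words_after_header
-- ===== SOURCE A (Python) =====
-- def split_words_after_header(text):
--     """Strip header, return list of words."""
--     lines = text.split("\n")
--     # Skip header (everything before the ===== line)
--     body_start = 0
--     for i, line in enumerate(lines):
--         if "======" in line:
--             body_start = i + 1
--             break
--     body = " ".join(lines[body_start:])
--     return body.split()
-- ===== SOURCE B (Python) =====
-- def split_words_after_header(text):
--     """Strip header, return list of words (string-scan version: no line list)."""
--     p = text.find("======")
--     if p == -1:
--         return text.split()
--     nl = text.find("\n", p)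
--     if nl == -1:
--         return []
--     return text[nl + 1:].split()
-- ===== Notes on version B (the rewrite author's own statement) =====
-- stated objective: simpler
-- what changed: B drops A's split-into-lines list and enumerate loop entirely: it finds the marker with str.find, finds the next newline with str.find(start), and whitespace-splits the sliced tail of the raw string (A joins the remaining lines and splits the join).
import Mathlib
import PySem

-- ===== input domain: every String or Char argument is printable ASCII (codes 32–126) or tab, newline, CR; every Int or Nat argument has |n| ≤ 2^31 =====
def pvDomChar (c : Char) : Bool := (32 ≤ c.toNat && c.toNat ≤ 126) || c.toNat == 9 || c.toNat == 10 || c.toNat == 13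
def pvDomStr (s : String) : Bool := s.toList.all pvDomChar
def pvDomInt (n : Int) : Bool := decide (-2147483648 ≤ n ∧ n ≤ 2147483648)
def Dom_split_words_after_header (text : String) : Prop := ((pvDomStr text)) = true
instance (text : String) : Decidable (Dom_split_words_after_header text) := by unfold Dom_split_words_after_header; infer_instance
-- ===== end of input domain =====

-- B replaces A's line-list construction and index loop by a direct string scan (find the marker,
-- find the next newline, slice, split) — objective: simpler decomposition, same exact behaviour.


-- ===== PORT A =====
-- the 'body_start = 0; for i, line in enumerate(lines): if "======" in line: body_start = i+1; break' loop
def pvFindBody (m : List Char) : List (List Char) → Nat → Nat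
  | [], _ => 0
  | L :: rest, i => if PySem.Chars.isIn m L then i + 1 else pvFindBody m rest (i + 1)

def split_words_after_header (text : String) : List String :=
  -- lines = text.split("\n"); body = " ".join(lines[body_start:]); return body.split()
  (PySem.Chars.split₀
    (PySem.Chars.join " ".toList
      (PySem.List.slice (PySem.Chars.splitOn text.toList "\n".toList)
        (some ((pvFindBody "======".toList (PySem.Chars.splitOn text.toList "\n".toList) 0 : Nat) : Int)) none))).map String.ofList

-- ===== PORT B =====
def split_words_after_header_alt (text : String) : List String :=
  if PySem.Str.find text "======" = -1 then PySem.Str.split₀ text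
  else if PySem.Str.findFrom text "\n" (PySem.Str.find text "======") none = -1 then []
  else PySem.Str.split₀ (PySem.Str.slice text
        (some (PySem.Str.findFrom text "\n" (PySem.Str.find text "======") none + 1)) none)

-- ===== PRECONDITION & SPEC =====
def Spec_split_words_after_header (text : String) (out : List String) : Prop := out = split_words_after_header_alt text
instance (text : String) (out : List String) : Decidable (Spec_split_words_after_header text out) := by unfold Spec_split_words_after_header; infer_instance

-- ===== CLAIM (what is proved, stated in full; the proofs are below) =====
def Claim_equal_split_words_after_header : Prop := ∀ (text : String), Dom_split_words_after_header text → Spec_split_words_after_header text (split_words_after_header text)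

-- ===== LEMMAS AND PROOFS =====

-- char-level views of the two programs (proof helpers)
def pvA (cs : List Char) : List (List Char) :=
  PySem.Chars.split₀ (PySem.Chars.join [' ']
    (List.drop (pvFindBody "======".toList (PySem.Chars.splitOn cs ['\n']) 0)
      (PySem.Chars.splitOn cs ['\n'])))

def pvB (cs : List Char) : List (List Char) :=
  if PySem.Chars.find cs "======".toList = -1 then PySem.Chars.split₀ cs
  else if PySem.Chars.findFrom cs ['\n'] (PySem.Chars.find cs "======".toList) none = -1 then []
  else PySem.Chars.split₀ (PySem.List.slice cs
        (some (PySem.Chars.findFrom cs ['\n'] (PySem.Chars.find cs "======".toList) none + 1)) none)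

-- '\n' → ' ' substitution
def pvNl (c : Char) : Char := if c = '\n' then ' ' else c

-- reference form of splitOn by '\n'
def pvSp : List Char → List (List Char)
  | [] => [[]]
  | c :: r => if c = '\n' then [] :: pvSp r else (pvSp r).modifyHead (c :: ·)

-- equations of the PySem go-loops, in usable form
theorem spGo_nil (fuel : Nat) (cur : List Char) (acc : List (List Char)) :
    PySem.Chars.splitOn.go ['\n'] (fuel+1) [] cur acc = (cur.reverse :: acc).reverse := by
  rw [PySem.Chars.splitOn.go]; omega

theorem spGo_nl (fuel : Nat) (rest cur : List Char) (acc : List (List Char)) :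
    PySem.Chars.splitOn.go ['\n'] (fuel+1) ('\n'::rest) cur acc
      = PySem.Chars.splitOn.go ['\n'] fuel rest [] (cur.reverse :: acc) := by
  rw [PySem.Chars.splitOn.go]; simp [List.isPrefixOf]

theorem spGo_cons (fuel : Nat) {c : Char} (h : c ≠ '\n') (rest cur : List Char) (acc : List (List Char)) :
    PySem.Chars.splitOn.go ['\n'] (fuel+1) (c::rest) cur acc
      = PySem.Chars.splitOn.go ['\n'] fuel rest (c::cur) acc := by
  rw [PySem.Chars.splitOn.go]; simp [List.isPrefixOf, Ne.symm h]

theorem s0Go_space {c : Char} (h : PySem.Chars.isspace c = true) (rest cur : List Char) (acc : List (List Char)) :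
    PySem.Chars.split₀.go (c::rest) cur acc
      = if cur.isEmpty then PySem.Chars.split₀.go rest [] acc
        else PySem.Chars.split₀.go rest [] (cur.reverse :: acc) := by
  rw [PySem.Chars.split₀.go]; simp [h]

theorem s0Go_char {c : Char} (h : ¬ PySem.Chars.isspace c = true) (rest cur : List Char) (acc : List (List Char)) :
    PySem.Chars.split₀.go (c::rest) cur acc = PySem.Chars.split₀.go rest (c::cur) acc := by
  rw [PySem.Chars.split₀.go]; simp [h]

theorem findGo_nil (sub : List Char) (k : Nat) :
    PySem.Chars.find.go sub [] k = if sub.isEmpty then (k:Int) else -1 := by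
  rw [PySem.Chars.find.go]

theorem findGo_prefix {sub : List Char} {c : Char} {t : List Char}
    (h : sub.isPrefixOf (c::t) = true) (k : Nat) :
    PySem.Chars.find.go sub (c::t) k = (k:Int) := by
  rw [PySem.Chars.find.go]; simp [h]

theorem findGo_cons {sub : List Char} {c : Char} {t : List Char}
    (h : ¬ sub.isPrefixOf (c::t) = true) (k : Nat) :
    PySem.Chars.find.go sub (c::t) k = PySem.Chars.find.go sub t (k+1) := by
  rw [PySem.Chars.find.go]; simp [h]

theorem pvSp_ne_nil (cs : List Char) : pvSp cs ≠ [] := by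
  cases cs with
  | nil => simp [pvSp]
  | cons c r =>
    by_cases h : c = '\n' <;> simp [pvSp, h]
    cases hr : pvSp r with
    | nil => exact absurd hr (pvSp_ne_nil r)
    | cons a t => simp

theorem pvSp_go (cs : List Char) : ∀ (fuel : Nat) (cur : List Char) (acc : List (List Char)),
    cs.length < fuel →
    PySem.Chars.splitOn.go ['\n'] fuel cs cur acc
      = acc.reverse ++ (pvSp cs).modifyHead (cur.reverse ++ ·) := by
  induction cs with
  | nil =>
    intro fuel cur acc h
    match fuel, h with
    | fuel + 1, _ => rw [spGo_nil]; simp [pvSp]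
  | cons c r ih =>
    intro fuel cur acc h
    match fuel, h with
    | fuel + 1, h =>
      by_cases hc : c = '\n'
      · subst hc
        rw [spGo_nl, ih fuel [] (cur.reverse :: acc) (by simpa using h)]
        cases hr : pvSp r <;> simp [pvSp, hr, List.modifyHead_cons]
      · rw [spGo_cons fuel hc, ih fuel (c :: cur) acc (by simpa using h)]
        rcases hr : pvSp r with _ | ⟨a, t⟩
        · exact absurd hr (pvSp_ne_nil r)
        · simp [pvSp, hc, hr, List.modifyHead_cons]

theorem splitOn_eq_pvSp (cs : List Char) : PySem.Chars.splitOn cs ['\n'] = pvSp cs := by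
  unfold PySem.Chars.splitOn
  rw [pvSp_go cs (cs.length + 1) [] [] (by omega)]
  rcases hr : pvSp cs with _ | ⟨a, t⟩
  · exact absurd hr (pvSp_ne_nil cs)
  · simp [List.modifyHead_cons]

theorem pvSp_no_nl {cs : List Char} (h : '\n' ∉ cs) : pvSp cs = [cs] := by
  induction cs with
  | nil => rfl
  | cons c r ih =>
    have hc : c ≠ '\n' := by rintro rfl; exact h (List.mem_cons_self)
    have hr : '\n' ∉ r := fun hm => h (List.mem_cons_of_mem _ hm)
    simp [pvSp, hc, ih hr, List.modifyHead_cons]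

theorem pvSp_append {l : List Char} (rest : List Char) (h : '\n' ∉ l) :
    pvSp (l ++ '\n' :: rest) = l :: pvSp rest := by
  induction l with
  | nil => simp [pvSp]
  | cons c l' ih =>
    have hc : c ≠ '\n' := by rintro rfl; exact h (List.mem_cons_self)
    have hl : '\n' ∉ l' := fun hm => h (List.mem_cons_of_mem _ hm)
    simp [pvSp, hc, ih hl, List.modifyHead_cons]

theorem join_pvSp (cs : List Char) : PySem.Chars.join [' '] (pvSp cs) = cs.map pvNl := by
  induction cs with
  | nil => simp [pvSp, PySem.Chars.join, List.intercalate]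
  | cons c r ih =>
    rcases hr : pvSp r with _ | ⟨a, t⟩
    · exact absurd hr (pvSp_ne_nil r)
    · by_cases hc : c = '\n'
      · subst hc
        simp only [pvSp]
        rw [show ([] : List Char) :: pvSp r = [] :: a :: t by rw [hr]]
        simp only [PySem.Chars.join, List.intercalate] at *
        simp_all [pvNl]
      · simp only [pvSp, if_neg hc, hr, List.modifyHead_cons]
        simp only [PySem.Chars.join, List.intercalate] at *
        cases t <;> simp_all [pvNl]

theorem split₀_go_map (cs : List Char) : ∀ (cur : List Char) (acc : List (List Char)),
    PySem.Chars.split₀.go (cs.map pvNl) cur acc = PySem.Chars.split₀.go cs cur acc := by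
  induction cs with
  | nil => intro cur acc; rfl
  | cons c r ih =>
    intro cur acc
    have hsp : PySem.Chars.isspace (pvNl c) = PySem.Chars.isspace c := by
      by_cases hc : c = '\n' <;> simp [pvNl, hc]
      · decide
    by_cases h : PySem.Chars.isspace c = true
    · rw [List.map_cons, s0Go_space (by rw [hsp]; exact h), s0Go_space h]
      by_cases hcur : cur.isEmpty <;> simp [hcur, ih]
    · have hc : c ≠ '\n' := by rintro rfl; exact h (by decide)
      rw [List.map_cons, s0Go_char (by rw [hsp]; exact h), s0Go_char h]
      have : pvNl c = c := by simp [pvNl, hc]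
      rw [this, ih]

theorem split₀_map_pvNl (cs : List Char) :
    PySem.Chars.split₀ (cs.map pvNl) = PySem.Chars.split₀ cs := by
  unfold PySem.Chars.split₀; exact split₀_go_map cs [] []

-- find facts
theorem find_go_shift (sub : List Char) (s : List Char) : ∀ (k : Nat),
    PySem.Chars.find.go sub s k
      = if PySem.Chars.find.go sub s 0 = -1 then -1 else k + PySem.Chars.find.go sub s 0 := by
  induction s with
  | nil =>
    intro k
    by_cases h : sub.isEmpty <;> simp [findGo_nil, h]
  | cons c t ih =>
    intro k
    by_cases h : sub.isPrefixOf (c :: t) = true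
    · rw [findGo_prefix h, findGo_prefix h]; simp
    · rw [findGo_cons h, findGo_cons h, ih (k+1), ih 1]
      have hX : -1 ≤ PySem.Chars.find.go sub t 0 := PySem.Chars.neg_one_le_find t sub
      split_ifs <;> push_cast <;> omega

theorem find_prefix {s sub : List Char} (h : sub <+: s) : PySem.Chars.find s sub = 0 := by
  cases s with
  | nil =>
    have : sub = [] := List.prefix_nil.mp h
    simp [PySem.Chars.find, findGo_nil, this]
  | cons c t =>
    have hb : sub.isPrefixOf (c :: t) = true := List.isPrefixOf_iff_prefix.mpr h
    simp [PySem.Chars.find, findGo_prefix hb]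

theorem find_cons_not_prefix {sub : List Char} {c : Char} {t : List Char}
    (h : ¬ sub <+: (c :: t)) :
    PySem.Chars.find (c :: t) sub
      = if PySem.Chars.find t sub = -1 then -1 else 1 + PySem.Chars.find t sub := by
  have hb : ¬ (sub.isPrefixOf (c :: t) = true) := fun hb => h (List.isPrefixOf_iff_prefix.mp hb)
  unfold PySem.Chars.find
  rw [findGo_cons hb]
  simpa using find_go_shift sub t 1

theorem find_append_left {l : List Char} (s : List Char) {sub : List Char}
    (h : 0 ≤ PySem.Chars.find l sub) :
    PySem.Chars.find (l ++ s) sub = PySem.Chars.find l sub := by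
  induction l with
  | nil =>
    have : sub = [] := by
      by_contra hne
      have : sub <:+: ([] : List Char) := (PySem.Chars.find_nonneg_iff _ _).mp h
      exact hne (List.infix_nil.mp this)
    subst this
    rw [find_prefix (List.nil_prefix), find_prefix (List.nil_prefix)]
  | cons c t ih =>
    by_cases hp : sub <+: (c :: t)
    · rw [find_prefix hp, find_prefix (hp.trans (List.prefix_append _ _))]
    · have hform := find_cons_not_prefix (c := c) (t := t) hp
      have ht : 0 ≤ PySem.Chars.find t sub := by
        by_contra hneg
        have h1 : PySem.Chars.find t sub = -1 := by
          have := PySem.Chars.neg_one_le_find t sub; omega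
        rw [hform, if_pos h1] at h; omega
      have htne : ¬ (PySem.Chars.find t sub = -1) := by omega
      have hlen : sub.length ≤ t.length := ((PySem.Chars.find_nonneg_iff _ _).mp ht).length_le
      have hp' : ¬ sub <+: (c :: (t ++ s)) := by
        intro hps
        rw [← List.cons_append] at hps
        exact hp (List.prefix_of_prefix_length_le hps (List.prefix_append _ _) (by simp; omega))
      rw [List.cons_append, find_cons_not_prefix hp', ih ht, hform]

theorem not_prefix_append {sub l : List Char} {c : Char} (rest : List Char)
    (hc : c ∉ sub) (hni : ¬ sub <:+: l) : ¬ sub <+: (l ++ c :: rest) := by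
  intro hp
  by_cases hlen : sub.length ≤ l.length
  · exact hni (List.prefix_of_prefix_length_le hp (List.prefix_append _ _) hlen).isInfix
  · have h1 : (l ++ [c]) <+: (l ++ c :: rest) := ⟨rest, by simp⟩
    have h2 : (l ++ [c]) <+: sub :=
      List.prefix_of_prefix_length_le h1 hp (by simp; omega)
    exact hc (h2.subset (by simp))

theorem find_newline {a : List Char} (b : List Char) (h : '\n' ∉ a) :
    PySem.Chars.find (a ++ '\n' :: b) ['\n'] = a.length := by
  induction a with
  | nil => simpa using find_prefix (List.prefix_append ['\n'] b)
  | cons c a' ih =>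
    have hc : c ≠ '\n' := by rintro rfl; exact h (List.mem_cons_self)
    have ha : '\n' ∉ a' := fun hm => h (List.mem_cons_of_mem _ hm)
    have hp : ¬ ['\n'] <+: (c :: (a' ++ '\n' :: b)) := by
      rintro ⟨t2, ht⟩
      injection ht with h1 _
      exact hc h1.symm
    rw [List.cons_append, find_cons_not_prefix hp, ih ha]
    have hne : ¬ ((a'.length : Int) = -1) := by omega
    rw [if_neg hne]
    simp only [List.length_cons]
    push_cast; omega

theorem singleton_infix {c : Char} {s : List Char} : [c] <:+: s ↔ c ∈ s := by
  constructor
  · intro h; exact h.subset (by simp)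
  · intro h
    rcases List.append_of_mem h with ⟨p, q, rfl⟩
    exact ⟨p, q, by simp⟩

theorem find_no_newline {s : List Char} (h : '\n' ∉ s) :
    PySem.Chars.find s ['\n'] = -1 :=
  (PySem.Chars.find_eq_neg_one_iff _ _).mpr (fun hi => h (singleton_infix.mp hi))

theorem find_append_right {sub l : List Char} {c : Char} (rest : List Char)
    (hsub : sub ≠ []) (hc : c ∉ sub) (hni : ¬ sub <:+: l) :
    PySem.Chars.find (l ++ c :: rest) sub
      = if PySem.Chars.find rest sub = -1 then -1
        else l.length + 1 + PySem.Chars.find rest sub := by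
  induction l with
  | nil =>
    have hp : ¬ sub <+: (c :: rest) := by
      intro hp
      cases sub with
      | nil => exact hsub rfl
      | cons a tt =>
        rcases hp with ⟨t2, ht⟩
        simp only [List.cons_append] at ht
        injection ht with h1 _
        exact hc (by simp [h1])
    simpa using find_cons_not_prefix hp
  | cons d l' ih =>
    have hni' : ¬ sub <:+: l' := fun hi => hni (List.infix_cons hi)
    have hp : ¬ sub <+: ((d :: l') ++ c :: rest) := not_prefix_append rest hc hni
    simp only [List.cons_append] at hp ⊢
    rw [find_cons_not_prefix hp, ih hni']
    have hX : -1 ≤ PySem.Chars.find rest sub := PySem.Chars.neg_one_le_find rest sub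
    split_ifs <;> push_cast [List.length_cons] <;> omega

theorem infix_append_iff {sub l : List Char} {c : Char} (rest : List Char)
    (hsub : sub ≠ []) (hc : c ∉ sub) :
    sub <:+: (l ++ c :: rest) ↔ sub <:+: l ∨ sub <:+: rest := by
  constructor
  · intro h
    by_cases hl : sub <:+: l
    · exact Or.inl hl
    · right
      have hform := find_append_right (sub := sub) (l := l) rest hsub hc hl
      have h0 : 0 ≤ PySem.Chars.find (l ++ c :: rest) sub := (PySem.Chars.find_nonneg_iff _ _).mpr h
      by_cases hr : PySem.Chars.find rest sub = -1
      · rw [hform, if_pos hr] at h0; omega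
      · have : 0 ≤ PySem.Chars.find rest sub := by
          have := PySem.Chars.neg_one_le_find rest sub; omega
        exact (PySem.Chars.find_nonneg_iff _ _).mp this
  · rintro (h | h)
    · exact h.trans (List.prefix_append _ _).isInfix
    · exact h.trans ((List.suffix_append_of_suffix (List.suffix_cons _ _)).isInfix)

-- the body_start loop
theorem pvFindBody_eq (m : List Char) (ls : List (List Char)) : ∀ (i : Nat),
    pvFindBody m ls i
      = if ls.any (fun L => PySem.Chars.isIn m L)
        then i + ls.findIdx (fun L => PySem.Chars.isIn m L) + 1 else 0 := by
  induction ls with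
  | nil => intro i; simp [pvFindBody]
  | cons L rest ih =>
    intro i
    by_cases h : PySem.Chars.isIn m L
    · simp [pvFindBody, h, List.findIdx_cons]
    · simp only [pvFindBody, h, Bool.false_eq_true, if_neg, not_false_iff]
      rw [ih (i+1)]
      by_cases h2 : rest.any (fun L => PySem.Chars.isIn m L)
      · simp only [h2, if_pos, List.any_cons, h, Bool.false_or, List.findIdx_cons, cond_false]
        omega
      · simp [List.any_cons, h, h2]

theorem exists_first_nl {cs : List Char} (h : '\n' ∈ cs) :
    ∃ l rest, cs = l ++ '\n' :: rest ∧ '\n' ∉ l := by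
  induction cs with
  | nil => simp at h
  | cons c r ih =>
    by_cases hc : c = '\n'
    · exact ⟨[], r, by simp [hc], by simp⟩
    · have hr : '\n' ∈ r := by
        rcases List.mem_cons.mp h with h1 | h1
        · exact absurd h1.symm hc
        · exact h1
      obtain ⟨l, rest, h1, h2⟩ := ih hr
      exact ⟨c :: l, rest, by simp [h1], by simp [Ne.symm hc, h2]⟩

theorem any_isIn_aux (n : Nat) : ∀ (cs : List Char), cs.length ≤ n → ∀ {m : List Char}, m ≠ [] → '\n' ∉ m →
    (((pvSp cs).any (fun L => PySem.Chars.isIn m L) = true) ↔ m <:+: cs) := by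
  induction n with
  | zero =>
    intro cs hlen m hm hnm
    have : cs = [] := List.eq_nil_of_length_eq_zero (by omega)
    subst this
    simp [pvSp, PySem.Chars.isIn_iff_infix]
  | succ n ih =>
    intro cs hlen m hm hnm
    by_cases h : '\n' ∈ cs
    · obtain ⟨l, rest, rfl, hl⟩ := exists_first_nl h
      rw [pvSp_append rest hl, infix_append_iff rest hm hnm]
      have hrest : rest.length ≤ n := by
        simp [List.length_append] at hlen; omega
      simp only [List.any_cons, Bool.or_eq_true]
      rw [ih rest hrest hm hnm, PySem.Chars.isIn_iff_infix]
    · rw [pvSp_no_nl h]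
      simp [PySem.Chars.isIn_iff_infix]

theorem any_isIn_iff (cs : List Char) {m : List Char} (hm : m ≠ []) (hnm : '\n' ∉ m) :
    (((pvSp cs).any (fun L => PySem.Chars.isIn m L) = true) ↔ m <:+: cs) :=
  any_isIn_aux cs.length cs le_rfl hm hnm

-- evaluating pvB once find has landed at a nonnegative position
theorem pvB_eval {cs : List Char} {k : Nat} (hp : PySem.Chars.find cs "======".toList = (k : Int)) :
    pvB cs = if PySem.Chars.find (cs.drop k) ['\n'] = -1 then []
             else PySem.Chars.split₀ (cs.drop (k + (PySem.Chars.find (cs.drop k) ['\n']).toNat + 1)) := by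
  have hle : (k : Int) ≤ cs.length := hp ▸ PySem.Chars.find_le_length cs _
  have hk : k ≤ cs.length := by exact_mod_cast hle
  have hff := PySem.Chars.findFrom_natCast cs ['\n'] k hk
  have hne : ¬ ((k : Int) = -1) := by omega
  unfold pvB
  rw [hp, if_neg hne, hff]
  by_cases hnl : PySem.Chars.find (cs.drop k) ['\n'] = -1
  · simp [hnl]
  · have hge : 0 ≤ PySem.Chars.find (cs.drop k) ['\n'] := by
      have := PySem.Chars.neg_one_le_find (cs.drop k) ['\n']; omega
    have hcond : ¬ ((k : Int) + PySem.Chars.find (cs.drop k) ['\n'] = -1) := by omega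
    simp only [if_neg hnl, if_neg hcond]
    rw [PySem.List.slice_from cs (by omega)]
    have hidx : ((k : Int) + PySem.Chars.find (cs.drop k) ['\n'] + 1).toNat
        = k + (PySem.Chars.find (cs.drop k) ['\n']).toNat + 1 := by omega
    rw [hidx]

theorem pvA_sp (cs : List Char) :
    pvA cs = PySem.Chars.split₀ (PySem.Chars.join [' ']
      (List.drop (pvFindBody "======".toList (pvSp cs) 0) (pvSp cs))) := by
  unfold pvA; rw [splitOn_eq_pvSp]

theorem pvM_ne_nil : "======".toList ≠ ([] : List Char) := by decide
theorem pvM_no_nl : '\n' ∉ "======".toList := by decide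

-- cases with no newline in the string
theorem pvAB_nonl {cs : List Char} (hnl : '\n' ∉ cs) : pvA cs = pvB cs := by
  by_cases hm : PySem.Chars.isIn "======".toList cs = true
  · -- marker in the single line: both return []
    have hA : pvA cs = [] := by
      rw [pvA_sp, pvSp_no_nl hnl]
      have h1 : pvFindBody "======".toList [cs] 0 = 1 := by
        simp only [pvFindBody]; rw [if_pos hm]
      rw [h1]
      rfl
    have hge : 0 ≤ PySem.Chars.find cs "======".toList :=
      (PySem.Chars.find_nonneg_iff _ _).mpr ((PySem.Chars.isIn_iff_infix _ _).mp hm)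
    obtain ⟨k, hk⟩ : ∃ k : Nat, PySem.Chars.find cs "======".toList = (k : Int) :=
      ⟨(PySem.Chars.find cs "======".toList).toNat, by omega⟩
    have hB : pvB cs = [] := by
      rw [pvB_eval hk]
      have : PySem.Chars.find (cs.drop k) ['\n'] = -1 :=
        find_no_newline (fun hmem => hnl (List.mem_of_mem_drop hmem))
      rw [if_pos this]
    rw [hA, hB]
  · -- no marker: both split the whole string
    have hA : pvA cs = PySem.Chars.split₀ cs := by
      rw [pvA_sp, pvSp_no_nl hnl]
      have h1 : pvFindBody "======".toList [cs] 0 = 0 := by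
        simp only [pvFindBody]; rw [if_neg hm]
      rw [h1]
      simp [PySem.Chars.join, List.intercalate]
    have hne : PySem.Chars.find cs "======".toList = -1 := by
      rw [PySem.Chars.find_eq_neg_one_iff]
      intro hi
      exact hm ((PySem.Chars.isIn_iff_infix _ _).mpr hi)
    have hB : pvB cs = PySem.Chars.split₀ cs := by
      unfold pvB; rw [if_pos hne]
    rw [hA, hB]

-- marker in the first line: both return the words of the tail
theorem pvAB_hit {l : List Char} (rest : List Char) (hl : '\n' ∉ l)
    (hml : PySem.Chars.isIn "======".toList l = true) :
    pvA (l ++ '\n' :: rest) = pvB (l ++ '\n' :: rest) := by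
  have hA : pvA (l ++ '\n' :: rest) = PySem.Chars.split₀ rest := by
    rw [pvA_sp, pvSp_append rest hl]
    have h1 : pvFindBody "======".toList (l :: pvSp rest) 0 = 1 := by
      simp only [pvFindBody]; rw [if_pos hml]
    rw [h1]
    simp only [List.drop_succ_cons, List.drop_zero]
    rw [join_pvSp, split₀_map_pvNl]
  have hfl : 0 ≤ PySem.Chars.find l "======".toList :=
    (PySem.Chars.find_nonneg_iff _ _).mpr ((PySem.Chars.isIn_iff_infix _ _).mp hml)
  obtain ⟨k, hk⟩ : ∃ k : Nat, PySem.Chars.find l "======".toList = (k : Int) :=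
    ⟨(PySem.Chars.find l "======".toList).toNat, by omega⟩
  have hkle : k ≤ l.length := by
    have := PySem.Chars.find_le_length l "======".toList
    rw [hk] at this
    exact_mod_cast this
  have hfcs : PySem.Chars.find (l ++ '\n' :: rest) "======".toList = (k : Int) := by
    rw [find_append_left _ hfl, hk]
  have hdrop : (l ++ '\n' :: rest).drop k = l.drop k ++ '\n' :: rest :=
    List.drop_append_of_le_length hkle
  have hnl2 : '\n' ∉ l.drop k := fun hm => hl (List.mem_of_mem_drop hm)
  have hfindnl : PySem.Chars.find ((l ++ '\n' :: rest).drop k) ['\n'] = ((l.drop k).length : Int) := by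
    rw [hdrop]; exact find_newline rest hnl2
  have hB : pvB (l ++ '\n' :: rest) = PySem.Chars.split₀ rest := by
    rw [pvB_eval hfcs, hfindnl]
    have hne : ¬ (((l.drop k).length : Int) = -1) := by omega
    rw [if_neg hne]
    have hidx : k + ((l.drop k).length : Int).toNat + 1 = l.length + 1 := by
      simp [List.length_drop]; omega
    rw [hidx]
    have hd2 : (l ++ '\n' :: rest).drop (l.length + 1) = rest := by
      rw [show l ++ '\n' :: rest = (l ++ ['\n']) ++ rest by simp,
        show l.length + 1 = (l ++ ['\n']).length by simp]
      exact List.drop_left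
    rw [hd2]
  rw [hA, hB]

-- marker beyond the first line: both programs step over the first line
theorem pvAB_step {l : List Char} (rest : List Char) (hl : '\n' ∉ l)
    (hml : ¬ PySem.Chars.isIn "======".toList l = true)
    (hmr : "======".toList <:+: rest) :
    pvA (l ++ '\n' :: rest) = pvA rest ∧ pvB (l ++ '\n' :: rest) = pvB rest := by
  have hany : (pvSp rest).any (fun L => PySem.Chars.isIn "======".toList L) = true :=
    (any_isIn_iff rest pvM_ne_nil pvM_no_nl).mpr hmr
  have hmlf : PySem.Chars.isIn "======".toList l = false := Bool.eq_false_iff.mpr hml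
  constructor
  · rw [pvA_sp, pvA_sp, pvSp_append rest hl, pvFindBody_eq, pvFindBody_eq]
    have hanyc : (l :: pvSp rest).any (fun L => PySem.Chars.isIn "======".toList L) = true := by
      rw [List.any_cons, hany, Bool.or_true]
    rw [if_pos hanyc, if_pos hany, List.findIdx_cons, hmlf]
    simp only [cond_false]
    rw [show 0 + (List.findIdx (fun L => PySem.Chars.isIn "======".toList L) (pvSp rest) + 1) + 1
        = (0 + List.findIdx (fun L => PySem.Chars.isIn "======".toList L) (pvSp rest) + 1) + 1 by omega,
      List.drop_succ_cons]
  · -- B side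
    have hnin : ¬ "======".toList <:+: l := fun hi => hml ((PySem.Chars.isIn_iff_infix _ _).mpr hi)
    have hfr : 0 ≤ PySem.Chars.find rest "======".toList :=
      (PySem.Chars.find_nonneg_iff _ _).mpr hmr
    obtain ⟨k, hk⟩ : ∃ k : Nat, PySem.Chars.find rest "======".toList = (k : Int) :=
      ⟨(PySem.Chars.find rest "======".toList).toNat, by omega⟩
    have hkne : ¬ (PySem.Chars.find rest "======".toList = -1) := by omega
    have hfcs : PySem.Chars.find (l ++ '\n' :: rest) "======".toList
        = ((l.length + 1 + k : Nat) : Int) := by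
      rw [find_append_right rest pvM_ne_nil pvM_no_nl hnin, if_neg hkne, hk]
      push_cast; ring
    have hdrop : (l ++ '\n' :: rest).drop (l.length + 1 + k) = rest.drop k := by
      rw [List.drop_append, List.drop_eq_nil_of_le (by omega),
        show l.length + 1 + k - l.length = k + 1 by omega]
      simp
    rw [pvB_eval hfcs, pvB_eval hk, hdrop]
    by_cases hnl : PySem.Chars.find (rest.drop k) ['\n'] = -1
    · rw [if_pos hnl, if_pos hnl]
    · rw [if_neg hnl, if_neg hnl]
      have hd3 : (l ++ '\n' :: rest).drop
          (l.length + 1 + k + (PySem.Chars.find (rest.drop k) ['\n']).toNat + 1)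
          = rest.drop (k + (PySem.Chars.find (rest.drop k) ['\n']).toNat + 1) := by
        rw [List.drop_append, List.drop_eq_nil_of_le (by omega),
          show l.length + 1 + k + (PySem.Chars.find (rest.drop k) ['\n']).toNat + 1 - l.length
            = (k + (PySem.Chars.find (rest.drop k) ['\n']).toNat + 1) + 1 by omega]
        simp
      rw [hd3]
  
-- no marker anywhere (but a newline is present)
theorem pvAB_miss {l : List Char} (rest : List Char) (hl : '\n' ∉ l)
    (hml : ¬ PySem.Chars.isIn "======".toList l = true)
    (hmr : ¬ "======".toList <:+: rest) :
    pvA (l ++ '\n' :: rest) = pvB (l ++ '\n' :: rest) := by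
  have hany : ¬ ((pvSp rest).any (fun L => PySem.Chars.isIn "======".toList L) = true) :=
    fun h => hmr ((any_isIn_iff rest pvM_ne_nil pvM_no_nl).mp h)
  have hA : pvA (l ++ '\n' :: rest) = PySem.Chars.split₀ (l ++ '\n' :: rest) := by
    rw [pvA_sp, pvFindBody_eq]
    have hno : ¬ ((pvSp (l ++ '\n' :: rest)).any (fun L => PySem.Chars.isIn "======".toList L) = true) := by
      rw [pvSp_append rest hl]
      simp only [List.any_cons, Bool.or_eq_true]
      rintro (h | h)
      · exact hml h
      · exact hany h
    rw [if_neg hno, List.drop_zero, join_pvSp, split₀_map_pvNl]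
  have hne : PySem.Chars.find (l ++ '\n' :: rest) "======".toList = -1 := by
    rw [PySem.Chars.find_eq_neg_one_iff, infix_append_iff rest pvM_ne_nil pvM_no_nl]
    rintro (h | h)
    · exact hml ((PySem.Chars.isIn_iff_infix _ _).mpr h)
    · exact hmr h
  have hB : pvB (l ++ '\n' :: rest) = PySem.Chars.split₀ (l ++ '\n' :: rest) := by
    unfold pvB; rw [if_pos hne]
  rw [hA, hB]

-- main char-level equivalence
theorem pvAB_aux (n : Nat) : ∀ (cs : List Char), cs.length ≤ n → pvA cs = pvB cs := by
  induction n with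
  | zero =>
    intro cs hlen
    have : cs = [] := List.eq_nil_of_length_eq_zero (by omega)
    subst this
    exact pvAB_nonl (by simp)
  | succ n ih =>
    intro cs hlen
    by_cases hnlcs : '\n' ∈ cs
    · obtain ⟨l, rest, rfl, hl⟩ := exists_first_nl hnlcs
      have hrest : rest.length ≤ n := by
        simp only [List.length_append, List.length_cons] at hlen; omega
      by_cases hml : PySem.Chars.isIn "======".toList l = true
      · exact pvAB_hit rest hl hml
      · by_cases hmr : "======".toList <:+: rest
        · obtain ⟨hA, hB⟩ := pvAB_step rest hl hml hmr
          rw [hA, hB]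
          exact ih rest hrest
        · exact pvAB_miss rest hl hml hmr
    · exact pvAB_nonl hnlcs

theorem pvA_eq_pvB (cs : List Char) : pvA cs = pvB cs := pvAB_aux cs.length cs le_rfl

-- lift to strings
theorem portA_eq (text : String) :
    split_words_after_header text = (pvA text.toList).map String.ofList := by
  unfold split_words_after_header pvA
  rw [PySem.List.slice_from _ (Int.natCast_nonneg _)]
  rfl

theorem portB_eq (text : String) :
    split_words_after_header_alt text = (pvB text.toList).map String.ofList := by
  unfold split_words_after_header_alt pvB
  simp only [PySem.Str.find, PySem.Str.findFrom, PySem.Str.split₀, PySem.Str.slice]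
  split_ifs <;> simp_all [PySem.Chars.slice_eq_listSlice]

-- ===== VERDICT (by name: the statement is the Claim_ definition above) =====
theorem split_words_after_header_spec : Claim_equal_split_words_after_header := by
  intro text _
  unfold Spec_split_words_after_header
  rw [portA_eq, portB_eq, pvA_eq_pvB]
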